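-- pv_equiv track=rewrite | github.com/JavierKrick/Programaci-nDin-mica | cartas.py | repartirCartas
-- ===== SOURCE A (Python) =====
-- def contarCantidadDeFavoritosPorFavorito(secuenciaDeFavoritos):
--     conteoDeFavoritos = {}
--     for n in secuenciaDeFavoritos:
--         conteoDeFavoritos[n] = conteoDeFavoritos.get(n, 0) + 1
--     listaDeFavoritos = list(conteoDeFavoritos)
--
--     return conteoDeFavoritos, listaDeFavoritos
--
-- def contarCartasPorNumero(listaDeCartas):
--     conteo_cartas = {}
--
--     for n in listaDeCartas:
--         conteo_cartas[n] = conteo_cartas.get(n, 0) + 1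
--     return conteo_cartas
--
-- def repartirCartas(listaDeCartas, secuenciaDeFavoritos, cantidadDeJugadores,alegrias,maximasCartasPorJugador):
--
--
--
--     QdeFavoritos, listaDeFavoritos = contarCantidadDeFavoritosPorFavorito(secuenciaDeFavoritos)
--     QporNumero = contarCartasPorNumero(listaDeCartas)
--     res = 0
--
--
--
--     for i in listaDeFavoritos:
--         cantidadDeJugadores = QdeFavoritos[i]
--         if i in QporNumero:
--             totalDeCartas = QporNumero[i]
--             res = res +obtenerAlegriaMaximaPorNumero(alegrias, totalDeCartas, cantidadDeJugadores,maximasCartasPorJugador)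
--
--     return res
--
-- def obtenerAlegriaMaximaPorNumero(alegrias, totalDeCartas, jugadores, maximasCartasPorJugador):
--
--
--
--     tabla = []
--     fil = jugadores + 1
--     col = totalDeCartas + 1
--
--
--
--     for _ in range(fil):
--         nueva_fila = [0] * col
--         tabla.append(nueva_fila)
--
--
--     for j in range(jugadores):
--         for cartasUsadas in range(totalDeCartas + 1):
--
--
--
--             for cartasNuevas in range(maximasCartasPorJugador + 1):
--
--                 if cartasUsadas + cartasNuevas <= totalDeCartas:
--                     if cartasNuevas < len(alegrias):
--
--                         actual = tabla[j][cartasUsadas] + alegrias[cartasNuevas]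
--
--                         cartasTotales = cartasNuevas + cartasUsadas
--
--                         if (actual > tabla[j + 1][cartasTotales]): #tomo el máximo
--                             tabla[j+1][cartasTotales] = actual
--
--     return tabla[jugadores][totalDeCartas]
-- ===== SOURCE B (Python) =====
-- # B: per favorite number, the per-player DP is replaced by exponentiation-by-squaring
-- # of a (max,+) convolution of monotone "best joy with at most k cards" vectors.
--
-- def _conv(x, y):
--     # (max,+) convolution truncated to len(x); x, y same length, monotone nondecreasing
--     m = len(x)
--     return [max(x[i] + y[k - i] for i in range(k + 1)) for k in range(m)]
--
-- def _pow(base, c):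
--     # base^(max,+ conv) c, c >= 1, by squaring
--     if c == 1:
--         return base
--     half = _pow(base, c // 2)
--     sq = _conv(half, half)
--     return _conv(sq, base) if c % 2 else sq
--
-- def repartirCartas(listaDeCartas, secuenciaDeFavoritos, cantidadDeJugadores, alegrias, maximasCartasPorJugador):
--     favCount = {}
--     for n in secuenciaDeFavoritos:
--         favCount[n] = favCount.get(n, 0) + 1
--     cardCount = {}
--     for n in listaDeCartas:
--         cardCount[n] = cardCount.get(n, 0) + 1
--
--     res = 0
--     for i, c in favCount.items():
--         if i not in cardCount:
--             continue
--         t = cardCount[i]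
--         # base[k] = best joy a single player can get using at most k cards (or opt out for 0)
--         lim = min(maximasCartasPorJugador, len(alegrias) - 1)
--         base = []
--         cur = 0
--         for k in range(t + 1):
--             if k <= lim:
--                 cur = max(cur, alegrias[k])
--             base.append(cur)
--         res += _pow(base, c)[t]
--     return res
-- ===== Notes on version B (the rewrite author's own statement) =====
-- stated objective: faster
-- what changed: Per favorite number, A fills a (players+1)x(cards+1) table scanning all per-player card counts; B builds the monotone 'best joy with at most k cards' vector once and raises it to the player-count power under (max,+) convolution by exponentiation-by-squaring.
import Mathlib
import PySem

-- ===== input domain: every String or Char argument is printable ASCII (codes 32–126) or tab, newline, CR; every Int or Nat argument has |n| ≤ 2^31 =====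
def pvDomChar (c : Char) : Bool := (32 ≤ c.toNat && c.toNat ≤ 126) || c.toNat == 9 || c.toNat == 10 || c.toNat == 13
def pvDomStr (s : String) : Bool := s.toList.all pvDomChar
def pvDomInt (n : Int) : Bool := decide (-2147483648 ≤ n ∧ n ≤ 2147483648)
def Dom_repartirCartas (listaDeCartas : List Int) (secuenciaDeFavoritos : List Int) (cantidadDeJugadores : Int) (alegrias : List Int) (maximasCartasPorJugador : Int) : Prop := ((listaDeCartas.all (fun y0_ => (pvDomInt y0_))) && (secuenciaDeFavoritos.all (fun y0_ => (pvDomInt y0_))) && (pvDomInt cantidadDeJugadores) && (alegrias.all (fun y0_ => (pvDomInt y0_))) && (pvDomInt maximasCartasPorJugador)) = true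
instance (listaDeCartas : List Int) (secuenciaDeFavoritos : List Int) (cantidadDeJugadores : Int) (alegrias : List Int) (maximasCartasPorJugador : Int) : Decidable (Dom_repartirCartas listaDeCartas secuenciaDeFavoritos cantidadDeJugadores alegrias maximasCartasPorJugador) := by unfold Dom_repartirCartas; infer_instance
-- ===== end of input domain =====

-- B replaces A's per-player joy DP by exponentiation-by-squaring of a (max,+) convolution
-- of monotone "best joy with at most k cards" vectors (objective: asymptotically fewer DP steps in the player count).

-- ===== PORT A =====
-- dict counting loop 'd[n] = d.get(n, 0) + 1'
def contarCantidadDeFavoritosPorFavorito (secuenciaDeFavoritos : List Int) :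
    PySem.Dict Int Int × List Int :=
  let conteoDeFavoritos :=
    secuenciaDeFavoritos.foldl (fun d n => d.insert n (d.getD n 0 + 1)) PySem.Dict.empty
  (conteoDeFavoritos, conteoDeFavoritos.keys)

def contarCartasPorNumero (listaDeCartas : List Int) : PySem.Dict Int Int :=
  listaDeCartas.foldl (fun d n => d.insert n (d.getD n 0 + 1)) PySem.Dict.empty

-- tabla[i][k] read / write; every index produced by A's loops is nonnegative and in range,
-- so getD/set on toNat is exact there.
def pvGet2 (t : List (List Int)) (i k : Nat) : Int := (t.getD i []).getD k 0
def pvSet2 (t : List (List Int)) (i k : Nat) (v : Int) : List (List Int) :=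
  t.set i ((t.getD i []).set k v)

def obtenerAlegriaMaximaPorNumero (alegrias : List Int) (totalDeCartas jugadores maximasCartasPorJugador : Int) : Int :=
  let fil := jugadores + 1
  let col := totalDeCartas + 1
  -- 'tabla.append([0] * col)' for each of range(fil)
  let tabla : List (List Int) :=
    (PySem.List.pyRange 0 fil 1).map (fun _ => List.replicate col.toNat 0)
  let tabla := (PySem.List.pyRange 0 jugadores 1).foldl (fun tabla j =>
    (PySem.List.pyRange 0 (totalDeCartas + 1) 1).foldl (fun tabla cartasUsadas =>
      (PySem.List.pyRange 0 (maximasCartasPorJugador + 1) 1).foldl (fun tabla cartasNuevas =>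
        if cartasUsadas + cartasNuevas ≤ totalDeCartas then
          if cartasNuevas < (alegrias.length : Int) then
            let actual := pvGet2 tabla j.toNat cartasUsadas.toNat +
              PySem.List.pyGetD alegrias cartasNuevas 0
            let cartasTotales := (cartasNuevas + cartasUsadas).toNat
            if actual > pvGet2 tabla (j.toNat + 1) cartasTotales then
              pvSet2 tabla (j.toNat + 1) cartasTotales actual
            else tabla
          else tabla
        else tabla) tabla) tabla) tabla
  pvGet2 tabla jugadores.toNat totalDeCartas.toNat

def repartirCartas (listaDeCartas : List Int) (secuenciaDeFavoritos : List Int) (cantidadDeJugadores : Int) (alegrias : List Int) (maximasCartasPorJugador : Int) : Int :=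
  let qf := contarCantidadDeFavoritosPorFavorito secuenciaDeFavoritos
  let QdeFavoritos := qf.1
  let listaDeFavoritos := qf.2
  let QporNumero := contarCartasPorNumero listaDeCartas
  -- 'cantidadDeJugadores = QdeFavoritos[i]' : i is always a key, so getD is exact
  listaDeFavoritos.foldl (fun res i =>
    let jugadores := QdeFavoritos.getD i 0
    if QporNumero.contains i then
      res + obtenerAlegriaMaximaPorNumero alegrias (QporNumero.getD i 0) jugadores maximasCartasPorJugador
    else res) 0

-- ===== PORT B =====
-- (max,+) convolution; Python's 'max(gen)' over the nonempty generator is the fold of max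
-- seeded with the first item (i = 0); folding the i = 0 item again is exact since max is idempotent.
def pvConv (x y : List Int) : List Int :=
  (List.range x.length).map (fun k =>
    (List.range (k + 1)).foldl (fun m i => max m (x.getD i 0 + y.getD (k - i) 0))
      (x.getD 0 0 + y.getD k 0))

-- exponentiation by squaring; Python is only ever called with c ≥ 1 ('if c == 1: return base');
-- the 'c ≤ 1' test makes the Lean recursion total and agrees with Python on c ≥ 1.
def pvPow (base : List Int) (c : Nat) : List Int :=
  if c ≤ 1 then base
  else
    let half := pvPow base (c / 2)
    let sq := pvConv half half
    if c % 2 = 1 then pvConv sq base else sq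
termination_by c
decreasing_by all_goals exact Nat.div_lt_self (by omega) (by omega)

def repartirCartas_alt (listaDeCartas : List Int) (secuenciaDeFavoritos : List Int) (cantidadDeJugadores : Int) (alegrias : List Int) (maximasCartasPorJugador : Int) : Int :=
  let favCount : PySem.Dict Int Int :=
    secuenciaDeFavoritos.foldl (fun d n => d.insert n (d.getD n 0 + 1)) PySem.Dict.empty
  let cardCount : PySem.Dict Int Int :=
    listaDeCartas.foldl (fun d n => d.insert n (d.getD n 0 + 1)) PySem.Dict.empty
  favCount.items.foldl (fun res p =>
    if cardCount.contains p.1 then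
      let t := cardCount.getD p.1 0
      let lim := min maximasCartasPorJugador ((alegrias.length : Int) - 1)
      -- base[k] = best joy of one player with at most k cards (or opting out)
      let base := (PySem.List.pyRange 0 (t + 1) 1).foldl (fun (s : Int × List Int) k =>
        let cur := if k ≤ lim then max s.1 (PySem.List.pyGetD alegrias k 0) else s.1
        (cur, s.2 ++ [cur])) (0, ([] : List Int))
      res + (pvPow base.2 p.2.toNat).getD t.toNat 0
    else res) 0

-- ===== PRECONDITION & SPEC =====
def Spec_repartirCartas (listaDeCartas : List Int) (secuenciaDeFavoritos : List Int) (cantidadDeJugadores : Int) (alegrias : List Int) (maximasCartasPorJugador : Int) (out : Int) : Prop := out = repartirCartas_alt listaDeCartas secuenciaDeFavoritos cantidadDeJugadores alegrias maximasCartasPorJugador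
instance (listaDeCartas : List Int) (secuenciaDeFavoritos : List Int) (cantidadDeJugadores : Int) (alegrias : List Int) (maximasCartasPorJugador : Int) (out : Int) : Decidable (Spec_repartirCartas listaDeCartas secuenciaDeFavoritos cantidadDeJugadores alegrias maximasCartasPorJugador out) := by unfold Spec_repartirCartas; infer_instance

-- ===== CLAIM (what is proved, stated in full; the proofs are below) =====
def Claim_equal_repartirCartas : Prop := ∀ (listaDeCartas : List Int) (secuenciaDeFavoritos : List Int) (cantidadDeJugadores : Int) (alegrias : List Int) (maximasCartasPorJugador : Int), Dom_repartirCartas listaDeCartas secuenciaDeFavoritos cantidadDeJugadores alegrias maximasCartasPorJugador → Spec_repartirCartas listaDeCartas secuenciaDeFavoritos cantidadDeJugadores alegrias maximasCartasPorJugador (repartirCartas listaDeCartas secuenciaDeFavoritos cantidadDeJugadores alegrias maximasCartasPorJugador)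


-- ===== LEMMAS AND PROOFS =====

-- running max with floor 0 over 0..k
def fmax (k : Nat) (f : Nat → Int) : Int :=
  (List.range (k+1)).foldl (fun m n => max m (f n)) 0

theorem fmax_zero (f : Nat → Int) : fmax 0 f = max 0 (f 0) := by
  simp [fmax, List.range_succ]

theorem fmax_succ (k : Nat) (f : Nat → Int) : fmax (k+1) f = max (fmax k f) (f (k+1)) := by
  simp [fmax, List.range_succ]

theorem fmax_nonneg (k : Nat) (f : Nat → Int) : 0 ≤ fmax k f := by
  induction k with
  | zero => rw [fmax_zero]; exact le_max_left _ _
  | succ k ih => rw [fmax_succ]; exact ih.trans (le_max_left _ _)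

theorem le_fmax {n k : Nat} (f : Nat → Int) (h : n ≤ k) : f n ≤ fmax k f := by
  induction k with
  | zero =>
    have : n = 0 := Nat.le_zero.mp h
    subst this; rw [fmax_zero]; exact le_max_right _ _
  | succ k ih =>
    rw [fmax_succ]
    rcases Nat.lt_or_ge n (k+1) with h' | h'
    · exact (ih (Nat.lt_succ_iff.mp h')).trans (le_max_left _ _)
    · have : n = k+1 := le_antisymm h h'
      subst this; exact le_max_right _ _

theorem fmax_le {k : Nat} {f : Nat → Int} {c : Int} (h0 : 0 ≤ c)
    (h : ∀ n, n ≤ k → f n ≤ c) : fmax k f ≤ c := by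
  induction k with
  | zero => rw [fmax_zero]; exact max_le h0 (h 0 le_rfl)
  | succ k ih =>
    rw [fmax_succ]
    exact max_le (ih (fun n hn => h n (hn.trans (Nat.le_succ k)))) (h (k+1) le_rfl)

theorem fmax_mono_f {k : Nat} {f g : Nat → Int} (h : ∀ n, n ≤ k → f n ≤ g n) :
    fmax k f ≤ fmax k g :=
  fmax_le (fmax_nonneg k g) (fun n hn => (h n hn).trans (le_fmax g hn))

theorem fmax_congr {k : Nat} {f g : Nat → Int} (h : ∀ n, n ≤ k → f n = g n) :
    fmax k f = fmax k g :=
  le_antisymm (fmax_mono_f (fun n hn => (h n hn).le))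
    (fmax_mono_f (fun n hn => (h n hn).symm.le))

theorem fmax_cases (k : Nat) (f : Nat → Int) :
    fmax k f = 0 ∨ ∃ n, n ≤ k ∧ fmax k f = f n := by
  induction k with
  | zero =>
    rw [fmax_zero]
    rcases le_total 0 (f 0) with h | h
    · exact Or.inr ⟨0, le_rfl, max_eq_right h⟩
    · exact Or.inl (max_eq_left h)
  | succ k ih =>
    rw [fmax_succ]
    rcases le_total (fmax k f) (f (k+1)) with h | h
    · exact Or.inr ⟨k+1, le_rfl, max_eq_right h⟩
    · rw [max_eq_left h]
      rcases ih with h' | ⟨n, hn, h'⟩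
      · exact Or.inl h'
      · exact Or.inr ⟨n, hn.trans (Nat.le_succ k), h'⟩

-- one raised entry: if f' agrees with f except at N ≤ k where f N = 0 and f' N = v,
-- then fmax k f' = max (fmax k f) v
theorem fmax_update {k N : Nat} {f f' : Nat → Int} {v : Int} (hN : N ≤ k)
    (hsame : ∀ n, n ≤ k → n ≠ N → f' n = f n) (hfN : f N = 0) (hf'N : f' N = v) :
    fmax k f' = max (fmax k f) v := by
  apply le_antisymm
  · apply fmax_le (le_trans (fmax_nonneg k f) (le_max_left _ _))
    intro n hn
    by_cases h : n = N
    · subst h; rw [hf'N]; exact le_max_right _ _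
    · rw [hsame n hn h]; exact (le_fmax f hn).trans (le_max_left _ _)
  · apply max_le
    · apply fmax_le (fmax_nonneg k f')
      intro n hn
      by_cases h : n = N
      · subst h; rw [hfN]; exact fmax_nonneg k f'
      · rw [← hsame n hn h]; exact le_fmax f' hn
    · rw [← hf'N]; exact le_fmax f' hN

-- the list [f 0, …, f (m-1)]
def vecOf (f : Nat → Int) (m : Nat) : List Int := (List.range m).map f

theorem vecOf_length (f : Nat → Int) (m : Nat) : (vecOf f m).length = m := by
  simp [vecOf]

theorem vecOf_getD {f : Nat → Int} {i m : Nat} (h : i < m) :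
    (vecOf f m).getD i 0 = f i := by
  rw [vecOf, List.getD_eq_getElem?_getD, List.getElem?_map, List.getElem?_range h]
  rfl

theorem vecOf_congr {f g : Nat → Int} {m : Nat} (h : ∀ i, i < m → f i = g i) :
    vecOf f m = vecOf g m := by
  unfold vecOf
  exact List.map_congr_left (fun i hi => h i (List.mem_range.mp hi))

theorem vecOf_zero_eq_replicate (m : Nat) : vecOf (fun _ => (0 : Int)) m = List.replicate m 0 := by
  simp [vecOf, List.map_const']

theorem vecOf_set {f : Nat → Int} {m N : Nat} (h : N < m) (v : Int) :
    (vecOf f m).set N v = vecOf (fun k => if k = N then v else f k) m := by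
  apply List.ext_getElem
  · simp [vecOf]
  · intro i h1 h2
    simp only [vecOf, List.getElem_set, List.getElem_map, List.getElem_range]
    have hi : i < m := by simpa [vecOf] using h2
    by_cases hiN : i = N
    · simp [hiN]
    · simp [hiN, Ne.symm hiN]

-- per-player base value: best joy with at most k cards, floored at 0
def bvecf (al : List Int) (mx : Int) (k : Nat) : Int :=
  fmax k (fun n => if (n : Int) ≤ mx ∧ n < al.length then al.getD n 0 else 0)

theorem bvecf_nonneg (al : List Int) (mx : Int) (k : Nat) : 0 ≤ bvecf al mx k :=
  fmax_nonneg _ _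

theorem bvecf_mono (al : List Int) (mx : Int) {a b : Nat} (h : a ≤ b) :
    bvecf al mx a ≤ bvecf al mx b := by
  unfold bvecf
  induction b with
  | zero => have : a = 0 := Nat.le_zero.mp h; subst this; exact le_rfl
  | succ b ih =>
    rcases Nat.lt_or_ge a (b+1) with h' | h'
    · rw [fmax_succ]; exact (ih (Nat.lt_succ_iff.mp h')).trans (le_max_left _ _)
    · have : a = b+1 := le_antisymm h h'; subst this; exact le_rfl

theorem w_le_bvecf {al : List Int} {mx : Int} {n k : Nat} (h : n ≤ k)
    (h1 : (n : Int) ≤ mx) (h2 : n < al.length) : al.getD n 0 ≤ bvecf al mx k := by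
  unfold bvecf
  have := le_fmax (k := k) (fun n => if (n : Int) ≤ mx ∧ n < al.length then al.getD n 0 else 0) h
  simpa [h1, h2] using this

-- A's table row recurrence (row j+1 from row j), clamp at 0 built in
def Tf (al : List Int) (mx : Int) : Nat → Nat → Int
  | 0, _ => 0
  | (s+1), k => fmax k (fun n =>
      if (n : Int) ≤ mx ∧ n < al.length then Tf al mx s (k - n) + al.getD n 0 else 0)

-- B's convolution-power recurrence
def Hf (al : List Int) (mx : Int) : Nat → Nat → Int
  | 0, _ => 0
  | (s+1), k => fmax k (fun i => Hf al mx s i + bvecf al mx (k - i))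

theorem Tf_nonneg (al : List Int) (mx : Int) (j k : Nat) : 0 ≤ Tf al mx j k := by
  cases j with
  | zero => exact le_rfl
  | succ s => exact fmax_nonneg _ _

theorem Hf_nonneg (al : List Int) (mx : Int) (j k : Nat) : 0 ≤ Hf al mx j k := by
  cases j with
  | zero => exact le_rfl
  | succ s => exact fmax_nonneg _ _

theorem Tf_mono_k (al : List Int) (mx : Int) (j : Nat) :
    ∀ {a b : Nat}, a ≤ b → Tf al mx j a ≤ Tf al mx j b := by
  induction j with
  | zero => intro a b _; exact le_rfl
  | succ s ih =>
    intro a b hab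
    show fmax a _ ≤ fmax b _
    apply fmax_le (fmax_nonneg _ _)
    intro n hn
    beta_reduce
    by_cases hv : (n : Int) ≤ mx ∧ n < al.length
    · rw [if_pos hv]
      have h1 : Tf al mx s (a - n) + al.getD n 0 ≤ Tf al mx s (b - n) + al.getD n 0 :=
        add_le_add (ih (Nat.sub_le_sub_right hab n)) le_rfl
      refine h1.trans ?_
      have := le_fmax (k := b) (fun n =>
        if (n : Int) ≤ mx ∧ n < al.length then Tf al mx s (b - n) + al.getD n 0 else 0)
        (hn.trans hab)
      simpa [hv.1, hv.2] using this
    · rw [if_neg hv]; exact fmax_nonneg _ _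

theorem Hf_mono_k (al : List Int) (mx : Int) (j : Nat) :
    ∀ {a b : Nat}, a ≤ b → Hf al mx j a ≤ Hf al mx j b := by
  induction j with
  | zero => intro a b _; exact le_rfl
  | succ s _ =>
    intro a b hab
    show fmax a _ ≤ fmax b _
    apply fmax_le (fmax_nonneg _ _)
    intro i hi
    beta_reduce
    have h1 : Hf al mx s i + bvecf al mx (a - i) ≤ Hf al mx s i + bvecf al mx (b - i) :=
      add_le_add le_rfl (bvecf_mono al mx (Nat.sub_le_sub_right hab i))
    refine h1.trans ?_
    exact le_fmax (fun i => Hf al mx s i + bvecf al mx (b - i)) (hi.trans hab)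

theorem Tf_mono_j (al : List Int) (mx : Int) {a b : Nat} (h : a ≤ b) (k : Nat) :
    Tf al mx a k ≤ Tf al mx b k := by
  induction b with
  | zero => have : a = 0 := Nat.le_zero.mp h; subst this; exact le_rfl
  | succ b ih =>
    rcases Nat.lt_or_ge a (b+1) with h' | h'
    · refine (ih (Nat.lt_succ_iff.mp h')).trans ?_
      clear ih h h'
      induction b generalizing k with
      | zero =>
        exact (Tf_nonneg al mx 1 k).trans' le_rfl
      | succ s ih =>
        show fmax k _ ≤ fmax k _
        apply fmax_mono_f
        intro n hn
        beta_reduce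
        by_cases hv : (n : Int) ≤ mx ∧ n < al.length
        · rw [if_pos hv, if_pos hv]
          exact add_le_add (ih (k - n)) le_rfl
        · rw [if_neg hv, if_neg hv]
    · have : a = b+1 := le_antisymm h h'; subst this; exact le_rfl

theorem Hf_mono_j (al : List Int) (mx : Int) {a b : Nat} (h : a ≤ b) (k : Nat) :
    Hf al mx a k ≤ Hf al mx b k := by
  induction b with
  | zero => have : a = 0 := Nat.le_zero.mp h; subst this; exact le_rfl
  | succ b ih =>
    rcases Nat.lt_or_ge a (b+1) with h' | h'
    · refine (ih (Nat.lt_succ_iff.mp h')).trans ?_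
      clear ih h h'
      induction b generalizing k with
      | zero => exact (Hf_nonneg al mx 1 k).trans' le_rfl
      | succ s ih =>
        show fmax k _ ≤ fmax k _
        apply fmax_mono_f
        intro i hi
        beta_reduce
        exact add_le_add (ih i) le_rfl
    · have : a = b+1 := le_antisymm h h'; subst this; exact le_rfl

theorem Hf_one (al : List Int) (mx : Int) (k : Nat) : Hf al mx 1 k = bvecf al mx k := by
  show fmax k (fun i => Hf al mx 0 i + bvecf al mx (k - i)) = bvecf al mx k
  apply le_antisymm
  · apply fmax_le (bvecf_nonneg al mx k)
    intro i hi
    show (0 : Int) + bvecf al mx (k - i) ≤ bvecf al mx k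
    rw [zero_add]
    exact bvecf_mono al mx (Nat.sub_le k i)
  · have := le_fmax (k := k) (fun i => Hf al mx 0 i + bvecf al mx (k - i)) (Nat.zero_le k)
    beta_reduce at this
    simpa [show Hf al mx 0 0 = 0 from rfl] using this

-- A's clamped per-player recurrence equals B's convolution-power recurrence
theorem Tf_eq_Hf (al : List Int) (mx : Int) (j k : Nat) : Tf al mx j k = Hf al mx j k := by
  induction j generalizing k with
  | zero => rfl
  | succ s ih =>
    apply le_antisymm
    · apply fmax_le (fmax_nonneg _ _)
      intro n hn
      beta_reduce
      by_cases hv : (n : Int) ≤ mx ∧ n < al.length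
      · rw [if_pos hv, ih]
        have h1 : Hf al mx s (k - n) + al.getD n 0 ≤ Hf al mx s (k - n) + bvecf al mx n :=
          add_le_add le_rfl (w_le_bvecf le_rfl hv.1 hv.2)
        refine h1.trans ?_
        have h2 : n = k - (k - n) := by omega
        have := le_fmax (k := k) (fun i => Hf al mx s i + bvecf al mx (k - i)) (Nat.sub_le k n)
        beta_reduce at this
        rw [← h2] at this
        exact this
      · rw [if_neg hv]; exact fmax_nonneg _ _
    · apply fmax_le (fmax_nonneg _ _)
      intro i hi
      rcases fmax_cases (k - i) (fun n =>
          if (n : Int) ≤ mx ∧ n < al.length then al.getD n 0 else 0) with hc | ⟨n, hn, hc⟩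
      · show Hf al mx s i + bvecf al mx (k - i) ≤ _
        rw [show bvecf al mx (k - i) = 0 from hc, add_zero, ← ih]
        exact (Tf_mono_k al mx s hi).trans (Tf_mono_j al mx (Nat.le_succ s) k)
      · show Hf al mx s i + bvecf al mx (k - i) ≤ _
        rw [show bvecf al mx (k - i) = _ from hc]
        by_cases hv : (n : Int) ≤ mx ∧ n < al.length
        · rw [if_pos hv, ← ih]
          have h1 : Tf al mx s i + al.getD n 0 ≤ Tf al mx s (k - n) + al.getD n 0 :=
            add_le_add (Tf_mono_k al mx s (by omega)) le_rfl
          refine h1.trans ?_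
          have := le_fmax (k := k) (fun n =>
            if (n : Int) ≤ mx ∧ n < al.length then Tf al mx s (k - n) + al.getD n 0 else 0)
            (by omega : n ≤ k)
          simpa [hv.1, hv.2] using this
        · rw [if_neg hv, add_zero, ← ih]
          exact (Tf_mono_k al mx s hi).trans (Tf_mono_j al mx (Nat.le_succ s) k)

-- (max,+) powers add: Hf (a+b) is the convolution of Hf a and Hf b
theorem Hf_add (al : List Int) (mx : Int) (a : Nat) :
    ∀ (b k : Nat), Hf al mx (a + b) k = fmax k (fun x => Hf al mx a x + Hf al mx b (k - x)) := by
  intro b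
  induction b with
  | zero =>
    intro k
    apply le_antisymm
    · have := le_fmax (k := k) (fun x => Hf al mx a x + Hf al mx 0 (k - x)) (le_refl k)
      beta_reduce at this
      rw [Nat.sub_self] at this
      simpa [show Hf al mx 0 0 = 0 from rfl] using this
    · apply fmax_le (Hf_nonneg al mx (a+0) k)
      intro x hx
      show Hf al mx a x + Hf al mx 0 (k - x) ≤ _
      show Hf al mx a x + 0 ≤ _
      rw [add_zero]
      exact (Hf_mono_k al mx a hx).trans (le_of_eq (by rw [Nat.add_zero]))
  | succ b ih =>
    intro k
    have hL : Hf al mx (a + (b+1)) k =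
        fmax k (fun i => Hf al mx (a + b) i + bvecf al mx (k - i)) := by
      rw [show a + (b+1) = (a+b)+1 by omega]
      rfl
    rw [hL]
    apply le_antisymm
    · apply fmax_le (fmax_nonneg _ _)
      intro i hi
      beta_reduce
      rw [ih i]
      rcases fmax_cases i (fun x => Hf al mx a x + Hf al mx b (i - x)) with hc | ⟨x, hx, hc⟩
      · rw [hc, zero_add]
        have h1 : bvecf al mx (k - i) ≤ Hf al mx (b+1) k := by
          rw [← Hf_one al mx (k - i)]
          exact (Hf_mono_j al mx (by omega) (k - i)).trans (Hf_mono_k al mx (b+1) (Nat.sub_le k i))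
        refine h1.trans ?_
        have h2 : Hf al mx (b+1) k ≤ Hf al mx a 0 + Hf al mx (b+1) (k - 0) := by
          rw [Nat.sub_zero]
          exact le_add_of_nonneg_left (Hf_nonneg al mx a 0)
        refine h2.trans ?_
        exact le_fmax (fun x => Hf al mx a x + Hf al mx (b+1) (k - x)) (Nat.zero_le k)
      · rw [hc]
        have h1 : Hf al mx b (i - x) + bvecf al mx (k - i) ≤ Hf al mx (b+1) (k - x) := by
          have := le_fmax (k := k - x) (fun y => Hf al mx b y + bvecf al mx (k - x - y))
            (by omega : i - x ≤ k - x)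
          beta_reduce at this
          rwa [show k - x - (i - x) = k - i by omega] at this
        calc Hf al mx a x + Hf al mx b (i - x) + bvecf al mx (k - i)
            = Hf al mx a x + (Hf al mx b (i - x) + bvecf al mx (k - i)) := by ring
          _ ≤ Hf al mx a x + Hf al mx (b+1) (k - x) := add_le_add le_rfl h1
          _ ≤ _ := le_fmax (fun x => Hf al mx a x + Hf al mx (b+1) (k - x)) (hx.trans hi)
    · apply fmax_le (fmax_nonneg _ _)
      intro x hx
      show Hf al mx a x + Hf al mx (b+1) (k - x) ≤ _
      rcases fmax_cases (k - x) (fun y => Hf al mx b y + bvecf al mx (k - x - y))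
        with hc | ⟨y, hy, hc⟩
      · rw [show Hf al mx (b+1) (k - x) = 0 from hc, add_zero]
        have h1 : Hf al mx a x ≤ Hf al mx (a+b) k :=
          (Hf_mono_j al mx (Nat.le_add_right a b) x).trans (Hf_mono_k al mx (a+b) hx)
        have h2 : Hf al mx (a+b) k ≤ Hf al mx (a+b) k + bvecf al mx (k - k) :=
          le_add_of_nonneg_right (bvecf_nonneg _ _ _)
        exact (h1.trans h2).trans
          (le_fmax (fun i => Hf al mx (a+b) i + bvecf al mx (k - i)) (le_refl k))
      · rw [show Hf al mx (b+1) (k - x) = _ from hc]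
        have hxy : x + y ≤ k := by omega
        have h1 : Hf al mx a x + Hf al mx b y ≤ Hf al mx (a+b) (x+y) := by
          have := le_fmax (k := x + y) (fun z => Hf al mx a z + Hf al mx b (x + y - z))
            (Nat.le_add_right x y)
          beta_reduce at this
          rw [show x + y - x = y by omega] at this
          rw [ih (x+y)]
          exact this
        calc Hf al mx a x + (Hf al mx b y + bvecf al mx (k - x - y))
            = (Hf al mx a x + Hf al mx b y) + bvecf al mx (k - (x+y)) := by
              rw [show k - x - y = k - (x+y) by omega]; ring
          _ ≤ Hf al mx (a+b) (x+y) + bvecf al mx (k - (x+y)) := add_le_add h1 le_rfl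
          _ ≤ _ := le_fmax (fun i => Hf al mx (a+b) i + bvecf al mx (k - i)) hxy

theorem foldl_max_from_init (k : Nat) (f : Nat → Int) (a : Int) :
    (List.range (k+1)).foldl (fun m n => max m (f n)) a =
      max a ((List.range (k+1)).foldl (fun m n => max m (f n)) (f 0)) := by
  induction k generalizing a with
  | zero => simp [List.range_succ]
  | succ k ih =>
    rw [List.range_succ, List.foldl_append, List.foldl_append, ih a]
    simp only [List.foldl_cons, List.foldl_nil]
    rw [max_assoc]

theorem cmax_eq_fmax (k : Nat) (f : Nat → Int) (h0 : 0 ≤ f 0) :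
    (List.range (k+1)).foldl (fun m n => max m (f n)) (f 0) = fmax k f := by
  unfold fmax
  rw [foldl_max_from_init k f 0]
  apply (max_eq_right _).symm
  refine h0.trans ?_
  exact (PySem.List.le_foldl_max_int (List.range (k+1)) f (f 0)).1

theorem pvConv_vecOf {f g : Nat → Int} {m : Nat} (hf : ∀ i, i < m → 0 ≤ f i)
    (hg : ∀ i, i < m → 0 ≤ g i) :
    pvConv (vecOf f m) (vecOf g m) = vecOf (fun k => fmax k (fun i => f i + g (k - i))) m := by
  unfold pvConv
  rw [vecOf_length]
  unfold vecOf
  apply List.map_congr_left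
  intro k hk
  have hk : k < m := List.mem_range.mp hk
  rw [show List.map f (List.range m) = vecOf f m from rfl,
      show List.map g (List.range m) = vecOf g m from rfl]
  have h1 : ∀ (acc : Int) (i : Nat), i ∈ List.range (k+1) →
      max acc ((vecOf f m).getD i 0 + (vecOf g m).getD (k-i) 0) = max acc (f i + g (k-i)) := by
    intro acc i hi
    have hi : i < k + 1 := List.mem_range.mp hi
    rw [vecOf_getD (by omega), vecOf_getD (by omega)]
  rw [PySem.List.foldl_congr_mem (List.range (k+1)) _ (fun acc i => max acc (f i + g (k-i))) _ h1]
  rw [vecOf_getD (by omega : 0 < m), vecOf_getD hk]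
  have := cmax_eq_fmax k (fun i => f i + g (k - i))
    (by simpa using add_nonneg (hf 0 (by omega)) (hg k hk))
  simpa using this

theorem vecOf_snoc (f : Nat → Int) (M : Nat) : vecOf f M ++ [f M] = vecOf f (M+1) := by
  simp [vecOf, List.range_succ]

theorem bvecf_zero (al : List Int) (mx : Int) :
    bvecf al mx 0 = max 0 (if ((0:Nat) : Int) ≤ mx ∧ 0 < al.length then al.getD 0 0 else 0) :=
  fmax_zero _

theorem bvecf_succ (al : List Int) (mx : Int) (s : Nat) :
    bvecf al mx (s+1) = max (bvecf al mx s)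
      (if ((s+1 : Nat) : Int) ≤ mx ∧ (s+1) < al.length then al.getD (s+1) 0 else 0) :=
  fmax_succ _ _

-- B's base-building loop produces vecOf (bvecf al mxp)
theorem base_fold_eq (al : List Int) (mxp : Int) (M : Nat) :
    (List.range M).foldl (fun (s : Int × List Int) (k : Nat) =>
        let cur := if (k : Int) ≤ min mxp ((al.length : Int) - 1) then
          max s.1 (PySem.List.pyGetD al (k : Int) 0) else s.1
        (cur, s.2 ++ [cur])) (0, ([] : List Int)) =
      ((if M = 0 then 0 else bvecf al mxp (M-1)), vecOf (bvecf al mxp) M) := by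
  induction M with
  | zero => simp [vecOf]
  | succ M ih =>
    rw [List.range_succ, List.foldl_append, ih]
    simp only [List.foldl_cons, List.foldl_nil]
    have hvalid : ((M : Int) ≤ min mxp ((al.length : Int) - 1)) ↔
        ((M : Int) ≤ mxp ∧ M < al.length) := by
      rw [le_min_iff]
      constructor
      · rintro ⟨h1, h2⟩; exact ⟨h1, by omega⟩
      · rintro ⟨h1, h2⟩; exact ⟨h1, by omega⟩
    have hget : PySem.List.pyGetD al (M : Int) 0 = al.getD M 0 := by
      simp [PySem.List.pyGetD_natCast]
    have hcur : (if (M : Int) ≤ min mxp ((al.length : Int) - 1) then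
        max (if M = 0 then 0 else bvecf al mxp (M-1)) (PySem.List.pyGetD al (M : Int) 0)
        else (if M = 0 then 0 else bvecf al mxp (M-1))) = bvecf al mxp M := by
      by_cases hv : (M : Int) ≤ mxp ∧ M < al.length
      · rw [if_pos (hvalid.mpr hv), hget]
        cases M with
        | zero =>
          rw [if_pos rfl, bvecf_zero, if_pos hv]
        | succ s =>
          rw [if_neg (Nat.succ_ne_zero s), Nat.add_sub_cancel, bvecf_succ, if_pos hv]
      · rw [if_neg (fun hc => hv (hvalid.mp hc))]
        cases M with
        | zero =>
          rw [if_pos rfl, bvecf_zero, if_neg hv]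
          simp
        | succ s =>
          rw [if_neg (Nat.succ_ne_zero s), Nat.add_sub_cancel, bvecf_succ, if_neg hv]
          rw [max_eq_left (bvecf_nonneg al mxp s)]
    refine Prod.ext ?_ ?_
    · simpa using hcur
    · show (vecOf (bvecf al mxp) M ++ [_]) = vecOf (bvecf al mxp) (M+1)
      rw [hcur]
      exact vecOf_snoc _ _

theorem pvPow_vecOf (al : List Int) (mx : Int) (m : Nat) :
    ∀ c, 1 ≤ c → pvPow (vecOf (bvecf al mx) m) c = vecOf (Hf al mx c) m := by
  intro c
  induction c using Nat.strong_induction_on with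
  | _ c ih =>
    intro hc
    rcases Nat.lt_or_ge c 2 with h2 | h2
    · have : c = 1 := by omega
      subst this
      rw [pvPow, if_pos le_rfl]
      exact vecOf_congr (fun k _ => (Hf_one al mx k).symm)
    · have he1 : 1 ≤ c / 2 := by omega
      have helt : c / 2 < c := by omega
      have hhalf := ih (c/2) helt he1
      rw [pvPow, if_neg (by omega)]
      simp only [hhalf]
      have hsq : pvConv (vecOf (Hf al mx (c/2)) m) (vecOf (Hf al mx (c/2)) m) =
          vecOf (Hf al mx (c/2 + c/2)) m := by
        rw [pvConv_vecOf (fun i _ => Hf_nonneg al mx _ i) (fun i _ => Hf_nonneg al mx _ i)]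
        exact vecOf_congr (fun k _ => (Hf_add al mx (c/2) (c/2) k).symm)
      rw [hsq]
      by_cases hodd : c % 2 = 1
      · rw [if_pos hodd]
        have hconv : pvConv (vecOf (Hf al mx (c/2 + c/2)) m) (vecOf (bvecf al mx) m) =
            vecOf (Hf al mx (c/2 + c/2 + 1)) m := by
          rw [pvConv_vecOf (fun i _ => Hf_nonneg al mx _ i) (fun i _ => bvecf_nonneg al mx i)]
          exact vecOf_congr (fun k _ => rfl)
        rw [hconv, show c/2 + c/2 + 1 = c by omega]
      · rw [if_neg hodd, show c/2 + c/2 = c by omega]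

-- ---- generic list-of-rows helpers ----
theorem getD_set_self {l : List (List Int)} {i : Nat} (h : i < l.length) (v : List Int) :
    (l.set i v).getD i [] = v := by
  rw [List.getD_eq_getElem?_getD, List.getElem?_set_self (by omega)]
  rfl

theorem getD_set_ne {l : List (List Int)} {i j : Nat} (h : i ≠ j) (v : List Int) :
    (l.set i v).getD j [] = l.getD j [] := by
  rw [List.getD_eq_getElem?_getD, List.getElem?_set_ne h, ← List.getD_eq_getElem?_getD]

theorem set_getD_self {l : List (List Int)} {i : Nat} (h : i < l.length) :
    l.set i (l.getD i []) = l := by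
  apply List.ext_getElem
  · simp
  · intro k h1 h2
    rw [List.getElem_set]
    split
    · next heq => subst heq; rw [List.getD_eq_getElem?_getD, List.getElem?_eq_getElem h2]; rfl
    · rfl

-- a fold whose every step only rewrites row jn+1, reading row jn, is a pure fold on that row
theorem foldl_set_row (L : List Int) (jn : Nat) (F : List Int → List Int → Int → List Int)
    (step : List (List Int) → Int → List (List Int))
    (hstep : ∀ tabla n, jn + 1 < tabla.length →
      step tabla n = tabla.set (jn+1) (F (tabla.getD jn []) (tabla.getD (jn+1) []) n)) :
    ∀ tabla, jn + 1 < tabla.length →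
      L.foldl step tabla =
        tabla.set (jn+1) (L.foldl (F (tabla.getD jn [])) (tabla.getD (jn+1) [])) := by
  induction L with
  | nil =>
    intro tabla h
    simp only [List.foldl_nil]
    exact (set_getD_self h).symm
  | cons n L ih =>
    intro tabla h
    rw [List.foldl_cons, hstep tabla n h, List.foldl_cons]
    have hlen : jn + 1 < (tabla.set (jn+1) (F (tabla.getD jn []) (tabla.getD (jn+1) []) n)).length := by
      simpa using h
    rw [ih _ hlen]
    rw [getD_set_ne (by omega) _, getD_set_self (by omega) _, List.set_set]

def rowsOf (f : Nat → List Int) (m : Nat) : List (List Int) := (List.range m).map f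

theorem rowsOf_length (f : Nat → List Int) (m : Nat) : (rowsOf f m).length = m := by
  simp [rowsOf]

theorem rowsOf_getD {f : Nat → List Int} {i m : Nat} (h : i < m) :
    (rowsOf f m).getD i [] = f i := by
  rw [rowsOf, List.getD_eq_getElem?_getD, List.getElem?_map, List.getElem?_range h]
  rfl

theorem rowsOf_congr {f g : Nat → List Int} {m : Nat} (h : ∀ i, i < m → f i = g i) :
    rowsOf f m = rowsOf g m :=
  List.map_congr_left (fun i hi => h i (List.mem_range.mp hi))

theorem rowsOf_set {f : Nat → List Int} {m N : Nat} (h : N < m) (v : List Int) :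
    (rowsOf f m).set N v = rowsOf (fun r => if r = N then v else f r) m := by
  apply List.ext_getElem
  · simp [rowsOf]
  · intro i h1 h2
    simp only [rowsOf, List.getElem_set, List.getElem_map, List.getElem_range]
    by_cases hiN : i = N
    · simp [hiN]
    · simp [hiN, Ne.symm hiN]

-- ---- pure row recurrence for A's inner loops ----
-- value of row j+1 after processing all pairs with u < U, plus those with u = U and n < N
def RUNf (al : List Int) (mx : Int) (p : Nat → Int) (U N : Nat) (k : Nat) : Int :=
  fmax k (fun n =>
    if (n : Int) ≤ mx ∧ n < al.length ∧ (k - n < U ∨ (k - n = U ∧ n < N)) then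
      p (k - n) + al.getD n 0 else 0)

-- A's innermost step body as a pure row operation
def rowStepN (al : List Int) (t : Int) (prev : List Int) (u : Int) (row : List Int) (n : Int) : List Int :=
  if u + n ≤ t then
    if n < (al.length : Int) then
      if prev.getD u.toNat 0 + PySem.List.pyGetD al n 0 > row.getD (n + u).toNat 0 then
        row.set (n + u).toNat (prev.getD u.toNat 0 + PySem.List.pyGetD al n 0)
      else row
    else row
  else row

theorem rowStepN_eq (al : List Int) (mx : Int) (p : Nat → Int) (t : Int) (tn : Nat)
    (htn : t = (tn : Int)) (U N : Nat) (hU : U ≤ tn) (hN : (N : Int) ≤ mx) :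
    rowStepN al t (vecOf p (tn+1)) (U : Int) (vecOf (RUNf al mx p U N) (tn+1)) (N : Int) =
      vecOf (RUNf al mx p U (N+1)) (tn+1) := by
  unfold rowStepN
  by_cases hguard : (U : Int) + (N : Int) ≤ t
  · rw [if_pos hguard]
    by_cases hlen : (N : Int) < (al.length : Int)
    · rw [if_pos hlen]
      have hlenN : N < al.length := by exact_mod_cast hlen
      have hUN : U + N ≤ tn := by omega
      have hget : (vecOf p (tn+1)).getD (U : Int).toNat 0 = p U := by
        rw [Int.toNat_natCast]; exact vecOf_getD (by omega)
      have hkt : ((N : Int) + (U : Int)).toNat = N + U := by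
        rw [show ((N : Int) + (U : Int)) = ((N + U : Nat) : Int) by push_cast; ring,
          Int.toNat_natCast]
      have hpy : PySem.List.pyGetD al (N : Int) 0 = al.getD N 0 := by
        simp [PySem.List.pyGetD_natCast]
      have hrowget : (vecOf (RUNf al mx p U N) (tn+1)).getD (N + U) 0 = RUNf al mx p U N (N + U) :=
        vecOf_getD (by omega)
      have hnew : RUNf al mx p U (N+1) (N+U) = max (RUNf al mx p U N (N+U)) (p U + al.getD N 0) := by
        unfold RUNf
        apply fmax_update (show N ≤ N + U by omega)
        · intro n hn hne
          have : (N + U - n < U ∨ (N + U - n = U ∧ n < N + 1)) ↔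
              (N + U - n < U ∨ (N + U - n = U ∧ n < N)) := by omega
          simp only [this]
        · rw [if_neg (by omega)]
        · rw [if_pos ⟨hN, hlenN, by omega⟩, show N + U - N = U by omega]
      have hsame : ∀ k, k < tn + 1 → k ≠ N + U →
          RUNf al mx p U (N+1) k = RUNf al mx p U N k := by
        intro k _ hk
        unfold RUNf
        apply fmax_congr
        intro n hn
        have : ((n : Int) ≤ mx ∧ n < al.length ∧ (k - n < U ∨ (k - n = U ∧ n < N + 1))) ↔
            ((n : Int) ≤ mx ∧ n < al.length ∧ (k - n < U ∨ (k - n = U ∧ n < N))) := by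
          constructor
          · rintro ⟨h1, h2, h3⟩
            refine ⟨h1, h2, ?_⟩
            rcases h3 with h3 | ⟨h3, h4⟩
            · exact Or.inl h3
            · rcases Nat.lt_or_ge n N with h5 | h5
              · exact Or.inr ⟨h3, h5⟩
              · exfalso; omega
          · rintro ⟨h1, h2, h3⟩
            exact ⟨h1, h2, by omega⟩
        simp only [this]
      rw [hget, hpy, hkt, hrowget]
      by_cases hgt : RUNf al mx p U N (N+U) < p U + al.getD N 0
      · rw [if_pos hgt]
        rw [vecOf_set (by omega)]
        apply vecOf_congr
        intro k hk
        by_cases hkNU : k = N + U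
        · rw [if_pos hkNU, hkNU, hnew, max_eq_right hgt.le]
        · rw [if_neg hkNU, hsame k hk hkNU]
      · rw [if_neg hgt]
        apply vecOf_congr
        intro k hk
        by_cases hkNU : k = N + U
        · rw [hkNU, hnew, max_eq_left (not_lt.mp hgt)]
        · exact (hsame k hk hkNU).symm
    · rw [if_neg hlen]
      apply vecOf_congr
      intro k hk
      unfold RUNf
      apply fmax_congr
      intro n hn
      have hlenN : ¬ (N < al.length) := by exact_mod_cast hlen
      have : ((n : Int) ≤ mx ∧ n < al.length ∧ (k - n < U ∨ (k - n = U ∧ n < N))) ↔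
          ((n : Int) ≤ mx ∧ n < al.length ∧ (k - n < U ∨ (k - n = U ∧ n < N + 1))) := by
        constructor
        · rintro ⟨h1, h2, h3⟩; exact ⟨h1, h2, by omega⟩
        · rintro ⟨h1, h2, h3⟩
          refine ⟨h1, h2, ?_⟩
          rcases h3 with h3 | ⟨h3, h4⟩
          · exact Or.inl h3
          · rcases Nat.lt_or_ge n N with h5 | h5
            · exact Or.inr ⟨h3, h5⟩
            · exfalso
              have : n = N := by omega
              subst this
              exact hlenN h2
      simp only [this]
  · rw [if_neg hguard]
    apply vecOf_congr
    intro k hk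
    unfold RUNf
    apply fmax_congr
    intro n hn
    have hkUN : ¬ (k - n = U ∧ n = N) := by
      rintro ⟨h1, h2⟩
      subst h2
      have : k = U + n := by omega
      omega
    have : ((n : Int) ≤ mx ∧ n < al.length ∧ (k - n < U ∨ (k - n = U ∧ n < N))) ↔
        ((n : Int) ≤ mx ∧ n < al.length ∧ (k - n < U ∨ (k - n = U ∧ n < N + 1))) := by
      constructor
      · rintro ⟨h1, h2, h3⟩; exact ⟨h1, h2, by omega⟩
      · rintro ⟨h1, h2, h3⟩
        refine ⟨h1, h2, ?_⟩
        rcases h3 with h3 | ⟨h3, h4⟩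
        · exact Or.inl h3
        · rcases Nat.lt_or_ge n N with h5 | h5
          · exact Or.inr ⟨h3, h5⟩
          · exact absurd ⟨h3, by omega⟩ hkUN
    simp only [this]

theorem fmax_const_zero (k : Nat) : fmax k (fun _ => (0 : Int)) = 0 :=
  le_antisymm (fmax_le le_rfl (fun _ _ => le_rfl)) (fmax_nonneg _ _)

theorem RUNf_zero (al : List Int) (mx : Int) (p : Nat → Int) (k : Nat) :
    RUNf al mx p 0 0 k = 0 := by
  unfold RUNf
  rw [fmax_congr (g := fun _ => (0 : Int)) (fun n _ => by rw [if_neg (by omega)])]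
  exact fmax_const_zero k

theorem RUNf_end (al : List Int) (mx : Int) (p : Nat → Int) (U k : Nat) :
    RUNf al mx p U ((mx+1).toNat) k = RUNf al mx p (U+1) 0 k := by
  unfold RUNf
  apply fmax_congr
  intro n hn
  have : ((n : Int) ≤ mx ∧ n < al.length ∧ (k - n < U ∨ (k - n = U ∧ n < (mx+1).toNat))) ↔
      ((n : Int) ≤ mx ∧ n < al.length ∧ (k - n < U + 1 ∨ (k - n = U + 1 ∧ n < 0))) := by
    constructor
    · rintro ⟨h1, h2, h3⟩; exact ⟨h1, h2, Or.inl (by omega)⟩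
    · rintro ⟨h1, h2, h3⟩
      refine ⟨h1, h2, ?_⟩
      have hmn : n < (mx+1).toNat := by omega
      rcases Nat.lt_or_ge (k - n) U with h4 | h4
      · exact Or.inl h4
      · exact Or.inr ⟨by omega, hmn⟩
  simp only [this]

theorem RUNf_full (al : List Int) (mx : Int) (j tn : Nat) {k : Nat} (hk : k ≤ tn) :
    RUNf al mx (Tf al mx j) (tn+1) 0 k = Tf al mx (j+1) k := by
  show _ = fmax k _
  unfold RUNf
  apply fmax_congr
  intro n hn
  by_cases hv : (n : Int) ≤ mx ∧ n < al.length
  · rw [if_pos ⟨hv.1, hv.2, Or.inl (by omega)⟩, if_pos hv]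
  · rw [if_neg (fun h => hv ⟨h.1, h.2.1⟩), if_neg hv]

theorem innerN_fold (al : List Int) (mx : Int) (p : Nat → Int) (t : Int) (tn : Nat)
    (htn : t = (tn : Int)) (U : Nat) (hU : U ≤ tn) :
    ∀ M, M ≤ (mx+1).toNat →
    ((List.range M).map (fun n : Nat => (n : Int))).foldl
        (rowStepN al t (vecOf p (tn+1)) (U : Int))
        (vecOf (RUNf al mx p U 0) (tn+1)) = vecOf (RUNf al mx p U M) (tn+1) := by
  intro M
  induction M with
  | zero => intro _; rfl
  | succ M ih =>
    intro hM
    rw [List.range_succ, List.map_append, List.foldl_append, ih (by omega)]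
    simp only [List.map_cons, List.map_nil, List.foldl_cons, List.foldl_nil]
    exact rowStepN_eq al mx p t tn htn U M hU (by omega)

theorem innerU_fold (al : List Int) (mx : Int) (p : Nat → Int) (t : Int) (tn : Nat)
    (htn : t = (tn : Int)) :
    ∀ M, M ≤ tn + 1 →
    ((List.range M).map (fun u : Nat => (u : Int))).foldl
        (fun row u => ((List.range ((mx+1).toNat)).map (fun n : Nat => (n : Int))).foldl
          (rowStepN al t (vecOf p (tn+1)) u) row)
        (vecOf (RUNf al mx p 0 0) (tn+1)) = vecOf (RUNf al mx p M 0) (tn+1) := by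
  intro M
  induction M with
  | zero => intro _; rfl
  | succ M ih =>
    intro hM
    rw [List.range_succ, List.map_append, List.foldl_append, ih (by omega)]
    simp only [List.map_cons, List.map_nil, List.foldl_cons, List.foldl_nil]
    rw [innerN_fold al mx p t tn htn M (by omega) ((mx+1).toNat) le_rfl]
    exact vecOf_congr (fun k _ => RUNf_end al mx p M k)

theorem pyRange_zero_cast (X : Int) :
    PySem.List.pyRange 0 X 1 = (List.range X.toNat).map (fun n : Nat => (n : Int)) := by
  rw [PySem.List.pyRange_one]
  simp

-- A's whole table computation
theorem obtener_eq (al : List Int) (mx : Int) (t c : Int) (ht : 0 ≤ t) (hc : 0 ≤ c) :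
    obtenerAlegriaMaximaPorNumero al t c mx = Tf al mx c.toNat t.toNat := by
  have htn : t = ((t.toNat : Nat) : Int) := by omega
  have hcn : c = ((c.toNat : Nat) : Int) := by omega
  set tn := t.toNat with htn'
  set cn := c.toNat with hcn'
  -- the initial table
  have hinit : (PySem.List.pyRange 0 (c+1) 1).map (fun _ => List.replicate (t+1).toNat 0) =
      rowsOf (fun _ => vecOf (Tf al mx 0) (tn+1)) (cn+1) := by
    rw [pyRange_zero_cast, List.map_map, show (c+1).toNat = cn + 1 by omega, rowsOf]
    apply List.map_congr_left
    intro r hr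
    show List.replicate (t+1).toNat 0 = vecOf (Tf al mx 0) (tn+1)
    rw [show (t+1).toNat = tn + 1 by omega,
      show vecOf (Tf al mx 0) (tn+1) = vecOf (fun _ => (0:Int)) (tn+1) from
        vecOf_congr (fun k _ => rfl), vecOf_zero_eq_replicate]
  -- outer fold invariant
  have houter : ∀ J, J ≤ cn →
      ((List.range J).map (fun j : Nat => (j : Int))).foldl
        (fun tabla j =>
          (PySem.List.pyRange 0 (t + 1) 1).foldl (fun tabla cartasUsadas =>
            (PySem.List.pyRange 0 (mx + 1) 1).foldl (fun tabla cartasNuevas =>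
              if cartasUsadas + cartasNuevas ≤ t then
                if cartasNuevas < (al.length : Int) then
                  if pvGet2 tabla j.toNat cartasUsadas.toNat +
                      PySem.List.pyGetD al cartasNuevas 0 >
                      pvGet2 tabla (j.toNat + 1) (cartasNuevas + cartasUsadas).toNat then
                    pvSet2 tabla (j.toNat + 1) (cartasNuevas + cartasUsadas).toNat
                      (pvGet2 tabla j.toNat cartasUsadas.toNat +
                        PySem.List.pyGetD al cartasNuevas 0)
                  else tabla
                else tabla
              else tabla) tabla) tabla)
        (rowsOf (fun _ => vecOf (Tf al mx 0) (tn+1)) (cn+1)) =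
      rowsOf (fun r => vecOf (Tf al mx (if r ≤ J then r else 0)) (tn+1)) (cn+1) := by
    intro J
    induction J with
    | zero =>
      intro _
      simp only [List.range_zero, List.map_nil, List.foldl_nil]
      apply rowsOf_congr
      intro r hr
      by_cases h : r ≤ 0
      · have : r = 0 := by omega
        subst this
        simp
      · rw [if_neg h]
    | succ J ihJ =>
      intro hJ
      rw [List.range_succ, List.map_append, List.foldl_append, ihJ (by omega)]
      simp only [List.map_cons, List.map_nil, List.foldl_cons, List.foldl_nil]
      -- one outer iteration at j = J
      have hJlen : J + 1 < (rowsOf (fun r => vecOf (Tf al mx (if r ≤ J then r else 0)) (tn+1)) (cn+1)).length := by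
        rw [rowsOf_length]; omega
      -- n-level transfer: each innermost step only rewrites row J+1
      have hstepN : ∀ (u : Int) (tabla : List (List Int)) (n : Int), J + 1 < tabla.length →
          (if u + n ≤ t then
            if n < (al.length : Int) then
              if pvGet2 tabla ((J : Int)).toNat u.toNat + PySem.List.pyGetD al n 0 >
                  pvGet2 tabla (((J : Int)).toNat + 1) (n + u).toNat then
                pvSet2 tabla (((J : Int)).toNat + 1) (n + u).toNat
                  (pvGet2 tabla ((J : Int)).toNat u.toNat + PySem.List.pyGetD al n 0)
              else tabla
            else tabla
          else tabla) =
          tabla.set (J+1) (rowStepN al t (tabla.getD J []) u (tabla.getD (J+1) []) n) := by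
        intro u tabla n hlen
        simp only [pvGet2, pvSet2, rowStepN, Int.toNat_natCast]
        split_ifs with h1 h2 h3
        · rfl
        · exact (set_getD_self (by omega)).symm
        · exact (set_getD_self (by omega)).symm
        · exact (set_getD_self (by omega)).symm
      have hstepU : ∀ (tabla : List (List Int)) (u : Int), J + 1 < tabla.length →
          ((PySem.List.pyRange 0 (mx + 1) 1).foldl (fun tabla cartasNuevas =>
            if u + cartasNuevas ≤ t then
              if cartasNuevas < (al.length : Int) then
                if pvGet2 tabla ((J : Int)).toNat u.toNat +
                    PySem.List.pyGetD al cartasNuevas 0 >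
                    pvGet2 tabla (((J : Int)).toNat + 1) (cartasNuevas + u).toNat then
                  pvSet2 tabla (((J : Int)).toNat + 1) (cartasNuevas + u).toNat
                    (pvGet2 tabla ((J : Int)).toNat u.toNat +
                      PySem.List.pyGetD al cartasNuevas 0)
                else tabla
              else tabla
            else tabla) tabla) =
          tabla.set (J+1) ((PySem.List.pyRange 0 (mx + 1) 1).foldl
            (rowStepN al t (tabla.getD J []) u) (tabla.getD (J+1) [])) := by
        intro tabla u hlen
        exact foldl_set_row (PySem.List.pyRange 0 (mx + 1) 1) J
          (fun prev row n => rowStepN al t prev u row n) _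
          (fun tabla n h => hstepN u tabla n h) tabla hlen
      rw [foldl_set_row (PySem.List.pyRange 0 (t + 1) 1) J
        (fun prev row u => (PySem.List.pyRange 0 (mx + 1) 1).foldl (rowStepN al t prev u) row)
        _ (fun tabla u h => hstepU tabla u h) _ hJlen]
      have hprev : (rowsOf (fun r => vecOf (Tf al mx (if r ≤ J then r else 0)) (tn+1)) (cn+1)).getD J [] =
          vecOf (Tf al mx J) (tn+1) := by
        rw [rowsOf_getD (by omega), if_pos le_rfl]
      have hrow0 : (rowsOf (fun r => vecOf (Tf al mx (if r ≤ J then r else 0)) (tn+1)) (cn+1)).getD (J+1) [] =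
          vecOf (RUNf al mx (Tf al mx J) 0 0) (tn+1) := by
        rw [rowsOf_getD (by omega), if_neg (by omega)]
        exact vecOf_congr (fun k _ => (RUNf_zero al mx (Tf al mx J) k).symm)
      rw [hprev, hrow0]
      have hfold : (PySem.List.pyRange 0 (t + 1) 1).foldl
          (fun row u => (PySem.List.pyRange 0 (mx + 1) 1).foldl
            (rowStepN al t (vecOf (Tf al mx J) (tn+1)) u) row)
          (vecOf (RUNf al mx (Tf al mx J) 0 0) (tn+1)) =
          vecOf (Tf al mx (J+1)) (tn+1) := by
        rw [pyRange_zero_cast (t+1), pyRange_zero_cast (mx+1),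
          show (t+1).toNat = tn + 1 by omega]
        rw [innerU_fold al mx (Tf al mx J) t tn (by omega) (tn+1) le_rfl]
        exact vecOf_congr (fun k hk => RUNf_full al mx J tn (by omega))
      rw [hfold, rowsOf_set (by omega)]
      apply rowsOf_congr
      intro r hr
      by_cases h1 : r = J + 1
      · rw [if_pos h1, if_pos (by omega)]
        subst h1
        rfl
      · rw [if_neg h1]
        by_cases h2 : r ≤ J
        · rw [if_pos h2, if_pos (by omega)]
        · rw [if_neg h2, if_neg (by omega)]
  unfold obtenerAlegriaMaximaPorNumero
  dsimp only
  rw [hinit]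
  rw [show PySem.List.pyRange 0 c 1 = (List.range cn).map (fun j : Nat => (j : Int)) from
    pyRange_zero_cast c]
  rw [houter cn le_rfl]
  unfold pvGet2
  rw [rowsOf_getD (by omega), if_pos le_rfl, vecOf_getD (by omega)]

-- zeta-reduced restatement of base_fold_eq (definitionally equal step function)
theorem base_fold_eq' (al : List Int) (mxp : Int) (M : Nat) :
    (List.range M).foldl (fun (s : Int × List Int) (k : Nat) =>
        (if (k : Int) ≤ min mxp ((al.length : Int) - 1) then
            max s.1 (PySem.List.pyGetD al (k : Int) 0) else s.1,
         s.2 ++ [if (k : Int) ≤ min mxp ((al.length : Int) - 1) then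
            max s.1 (PySem.List.pyGetD al (k : Int) 0) else s.1])) (0, ([] : List Int)) =
      ((if M = 0 then 0 else bvecf al mxp (M-1)), vecOf (bvecf al mxp) M) :=
  base_fold_eq al mxp M

-- B's per-number computation
theorem alt_item_eq (al : List Int) (mx : Int) (t c : Int) (ht : 1 ≤ t) (hc : 1 ≤ c) :
    (pvPow ((List.range (t+1).toNat).foldl (fun (s : Int × List Int) (k : Nat) =>
        (if (k : Int) ≤ min mx ((al.length : Int) - 1) then
            max s.1 (PySem.List.pyGetD al (k : Int) 0) else s.1,
         s.2 ++ [if (k : Int) ≤ min mx ((al.length : Int) - 1) then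
            max s.1 (PySem.List.pyGetD al (k : Int) 0) else s.1])) (0, ([] : List Int))).2
      c.toNat).getD t.toNat 0 = Hf al mx c.toNat t.toNat := by
  rw [base_fold_eq' al mx ((t+1).toNat)]
  rw [show (t+1).toNat = t.toNat + 1 by omega]
  rw [pvPow_vecOf al mx (t.toNat + 1) c.toNat (by omega)]
  exact vecOf_getD (by omega)

-- the two programs agree
theorem repartir_eq (listaDeCartas secuenciaDeFavoritos : List Int) (cantidadDeJugadores : Int)
    (alegrias : List Int) (maximasCartasPorJugador : Int) :
    repartirCartas listaDeCartas secuenciaDeFavoritos cantidadDeJugadores alegrias maximasCartasPorJugador =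
      repartirCartas_alt listaDeCartas secuenciaDeFavoritos cantidadDeJugadores alegrias maximasCartasPorJugador := by
  unfold repartirCartas repartirCartas_alt contarCantidadDeFavoritosPorFavorito contarCartasPorNumero
  dsimp only
  rw [PySem.Dict.foldl_insert_getD_add_one_eq_counter,
    PySem.Dict.foldl_insert_getD_add_one_eq_counter,
    PySem.Dict.keys_counter, PySem.Dict.items_counter, List.foldl_map]
  apply PySem.List.foldl_congr_mem
  intro acc i hi
  have hifav : i ∈ secuenciaDeFavoritos := (PySem.Set.mem_ofList _ _).mp hi
  have hcfav : 1 ≤ secuenciaDeFavoritos.count i := List.count_pos_iff.mpr hifav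
  dsimp only
  by_cases hct : (PySem.Dict.counter listaDeCartas).contains i = true
  · rw [if_pos hct, if_pos hct]
    have hicard : i ∈ listaDeCartas := by
      rw [PySem.Dict.contains_counter] at hct
      exact List.contains_iff_mem.mp hct
    have hccard : 1 ≤ listaDeCartas.count i := List.count_pos_iff.mpr hicard
    rw [PySem.Dict.getD_counter, PySem.Dict.getD_counter]
    congr 1
    rw [obtener_eq alegrias maximasCartasPorJugador _ _ (by positivity) (by positivity)]
    rw [Tf_eq_Hf]
    have := alt_item_eq alegrias maximasCartasPorJugador (listaDeCartas.count i : Int)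
      (secuenciaDeFavoritos.count i : Int) (by exact_mod_cast hccard) (by exact_mod_cast hcfav)
    rw [pyRange_zero_cast ((listaDeCartas.count i : Int) + 1), List.foldl_map]
    exact this.symm
  · rw [if_neg hct, if_neg hct]

-- ===== VERDICT (by name: the statement is the Claim_ definition above) =====
theorem repartirCartas_spec : Claim_equal_repartirCartas := by
  intro listaDeCartas secuenciaDeFavoritos cantidadDeJugadores alegrias maximasCartasPorJugador _
  exact repartir_eq listaDeCartas secuenciaDeFavoritos cantidadDeJugadores alegrias maximasCartasPorJugador
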